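-- pv_equiv track=rewrite | github.com/pypi-data/pypi-mirror-34 | packages/middleware-test/middleware_test-2.1.tar.gz/middleware_test-2.1/middleware/model.py | __create_manager_name_combinations__
-- ===== SOURCE A (Python) =====
-- def __create_manager_name_combinations__(manager):
--     result = []
--
--     parts = manager.split(' ')
--     count = len(parts)
--     if count == 1:
--         raise RuntimeError("Manager name contains only first_name (without last_name)")
--     elif count == 2:
--         result.append((parts[0], parts[1]))
--     else:
--         '''
--         for example manager name is:  aaa bbb ccc ddd eee
--         then possible combinations are:
--
--         aaa --- bbb ccc ddd eee
--         aaa bbb --- ccc ddd eee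
--         aaa bbb ccc --- ddd eee
--         aaa bbb ccc ddd --- eee
--         '''
--
--         for position in range(count - 1):
--             shift = position + 1
--             result.append((' '.join(parts[:shift]), ' '.join(parts[shift:])))
--
--     return result
-- ===== SOURCE B (Python) =====
-- def __create_manager_name_combinations__(manager):
--     positions = [i for i, c in enumerate(manager) if c == ' ']
--     if not positions:
--         raise RuntimeError("Manager name contains only first_name (without last_name)")
--     return [(manager[:i], manager[i + 1:]) for i in positions]
-- ===== Notes on version B (the rewrite author's own statement) =====
-- stated objective: simpler
-- what changed: B scans the raw string once for space positions and returns (prefix, suffix) slices at each space, instead of splitting into tokens and re-joining prefix/suffix token lists (with a separate two-token special case).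
import Mathlib
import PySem

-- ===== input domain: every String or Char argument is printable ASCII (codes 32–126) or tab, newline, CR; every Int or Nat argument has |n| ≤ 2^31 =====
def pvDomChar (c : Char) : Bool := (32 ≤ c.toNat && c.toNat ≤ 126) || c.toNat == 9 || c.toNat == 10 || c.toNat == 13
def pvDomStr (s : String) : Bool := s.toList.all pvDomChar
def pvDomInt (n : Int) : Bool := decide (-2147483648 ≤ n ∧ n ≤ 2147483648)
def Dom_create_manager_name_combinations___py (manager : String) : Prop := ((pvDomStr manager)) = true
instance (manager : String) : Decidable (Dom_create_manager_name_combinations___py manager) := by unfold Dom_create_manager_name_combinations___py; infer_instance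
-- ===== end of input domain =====

-- B replaces token-split plus prefix/suffix re-joins by one scan for space positions and
-- direct string slicing at each space (return value proved equal; both raise where Pre_ excludes).

-- ===== PORT A =====
def create_manager_name_combinations___py (manager : String) : List (String × String) :=
  let parts := (PySem.Str.split? manager " ").getD []
  let count : Int := parts.length
  if count == 1 then []   -- Python: raise RuntimeError("Manager name contains only first_name (without last_name)"); excluded by Pre_
  else if count == 2 then
    [((PySem.List.pyGet? parts 0).getD "", (PySem.List.pyGet? parts 1).getD "")]
  else
    (PySem.List.pyRange 0 (count - 1)).map (fun position =>
      let shift := position + 1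
      (PySem.Str.join " " (PySem.List.slice parts none (some shift)),
       PySem.Str.join " " (PySem.List.slice parts (some shift) none)))

-- ===== PORT B =====
def create_manager_name_combinations___py_alt (manager : String) : List (String × String) :=
  let positions := ((PySem.List.enumerate manager.toList).filter (fun p => p.2 == ' ')).map (fun p => p.1)
  if positions.isEmpty then []   -- Python: raise RuntimeError("Manager name contains only first_name (without last_name)"); excluded by Pre_
  else positions.map (fun i =>
    (PySem.Str.slice manager none (some i), PySem.Str.slice manager (some (i + 1)) none))

-- ===== PRECONDITION & SPEC =====
-- Pre_ excludes exactly the strings with no space character, where the Python A raises RuntimeError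
-- (and Python B raises the same RuntimeError); A returns normally on every other input.
def Pre_create_manager_name_combinations___py (manager : String) : Prop := ' ' ∈ manager.toList
instance (manager : String) : Decidable (Pre_create_manager_name_combinations___py manager) := by unfold Pre_create_manager_name_combinations___py; infer_instance
def pvWitness_create_manager_name_combinations___py : String := "John Smith"

def Spec_create_manager_name_combinations___py (manager : String) (out : List (String × String)) : Prop := out = create_manager_name_combinations___py_alt manager
instance (manager : String) (out : List (String × String)) : Decidable (Spec_create_manager_name_combinations___py manager out) := by unfold Spec_create_manager_name_combinations___py; infer_instance

-- ===== CLAIM (what is proved, stated in full; the proofs are below) =====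
def Claim_equal_create_manager_name_combinations___py : Prop := ∀ (manager : String), Dom_create_manager_name_combinations___py manager → Pre_create_manager_name_combinations___py manager → Spec_create_manager_name_combinations___py manager (create_manager_name_combinations___py manager)

-- ===== LEMMAS AND PROOFS =====

/-- proof-only model of `' '.split`: first token and the remaining tokens. -/
def pvSplitF : List Char → List Char × List (List Char)
  | [] => ([], [])
  | c :: t => if c = ' ' then ([], (pvSplitF t).1 :: (pvSplitF t).2)
              else (c :: (pvSplitF t).1, (pvSplitF t).2)

/-- proof-only model of B's space positions. -/
def pvIdx : List Char → List Nat
  | [] => []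
  | c :: t => (if c = ' ' then [0] else []) ++ (pvIdx t).map (· + 1)

lemma pvSplitF_space (t : List Char) :
    pvSplitF (' ' :: t) = ([], (pvSplitF t).1 :: (pvSplitF t).2) := by simp [pvSplitF]

lemma pvSplitF_char {c : Char} (hc : c ≠ ' ') (t : List Char) :
    pvSplitF (c :: t) = (c :: (pvSplitF t).1, (pvSplitF t).2) := by simp [pvSplitF, hc]

lemma pvIdx_space (t : List Char) :
    pvIdx (' ' :: t) = 0 :: (pvIdx t).map (· + 1) := by simp [pvIdx]

lemma pvIdx_char {c : Char} (hc : c ≠ ' ') (t : List Char) :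
    pvIdx (c :: t) = (pvIdx t).map (· + 1) := by simp [pvIdx, hc]

lemma pv_go_spec : ∀ (fuel : Nat) (l cur : List Char) (acc : List (List Char)),
    l.length < fuel →
    PySem.Chars.splitOn.go [' '] fuel l cur acc
      = acc.reverse ++ (cur.reverse ++ (pvSplitF l).1) :: (pvSplitF l).2 := by
  intro fuel
  induction fuel with
  | zero => intro l cur acc h; omega
  | succ n ih =>
    intro l cur acc h
    cases l with
    | nil => simp [PySem.Chars.splitOn.go, pvSplitF]
    | cons c rest =>
      rw [PySem.Chars.splitOn.go]
      by_cases hc : c = ' '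
      · subst hc
        have hp : ([' '].isPrefixOf (' ' :: rest)) = true := by simp [List.isPrefixOf]
        rw [if_pos hp]
        have hd : List.drop [' '].length (' ' :: rest) = rest := rfl
        rw [hd, ih rest [] (cur.reverse :: acc) (by simpa using h)]
        rw [pvSplitF_space]
        simp
      · have hp : ([' '].isPrefixOf (c :: rest)) = false := by
          simp [List.isPrefixOf]
          intro hco; exact absurd hco.symm hc
        rw [if_neg (by simp [hp])]
        rw [ih rest (c :: cur) acc (by simpa using h)]
        rw [pvSplitF_char hc]
        simp

lemma pv_splitOn_eq (cs : List Char) :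
    PySem.Chars.splitOn cs [' '] = (pvSplitF cs).1 :: (pvSplitF cs).2 := by
  unfold PySem.Chars.splitOn
  rw [pv_go_spec (cs.length + 1) cs [] [] (by omega)]
  simp

lemma pv_join_cons_char (sep : List Char) (c : Char) (p : List Char) (xs : List (List Char)) :
    PySem.Chars.join sep ((c :: p) :: xs) = c :: PySem.Chars.join sep (p :: xs) := by
  cases xs with
  | nil => simp [PySem.Chars.join_singleton]
  | cons q r => simp [PySem.Chars.join_cons_cons]

lemma pv_join_nil_cons (sep : List Char) (q : List Char) (xs : List (List Char)) :
    PySem.Chars.join sep ([] :: q :: xs) = sep ++ PySem.Chars.join sep (q :: xs) := by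
  simp [PySem.Chars.join_cons_cons]

lemma pv_join_all (cs : List Char) :
    PySem.Chars.join [' '] ((pvSplitF cs).1 :: (pvSplitF cs).2) = cs := by
  induction cs with
  | nil => simp [pvSplitF, PySem.Chars.join_singleton]
  | cons c t ih =>
    by_cases hc : c = ' '
    · subst hc
      rw [pvSplitF_space]
      rw [show (([] : List Char), (pvSplitF t).1 :: (pvSplitF t).2).1 = [] from rfl,
        show (([] : List Char), (pvSplitF t).1 :: (pvSplitF t).2).2
          = (pvSplitF t).1 :: (pvSplitF t).2 from rfl]
      rw [pv_join_nil_cons, ih]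
      rfl
    · rw [pvSplitF_char hc]
      rw [show ((c :: (pvSplitF t).1, (pvSplitF t).2)).1 = c :: (pvSplitF t).1 from rfl,
        show ((c :: (pvSplitF t).1, (pvSplitF t).2)).2 = (pvSplitF t).2 from rfl]
      rw [pv_join_cons_char, ih]

lemma pv_main (cs : List Char) :
    (List.range (pvSplitF cs).2.length).map (fun k =>
       (PySem.Chars.join [' '] (((pvSplitF cs).1 :: (pvSplitF cs).2).take (k+1)),
        PySem.Chars.join [' '] (((pvSplitF cs).1 :: (pvSplitF cs).2).drop (k+1))))
    = (pvIdx cs).map (fun i => (cs.take i, cs.drop (i+1))) := by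
  induction cs with
  | nil => simp [pvSplitF, pvIdx]
  | cons c t ih =>
    by_cases hc : c = ' '
    · subst hc
      rw [pvSplitF_space, pvIdx_space]
      rw [show (([] : List Char), (pvSplitF t).1 :: (pvSplitF t).2).1 = [] from rfl,
        show (([] : List Char), (pvSplitF t).1 :: (pvSplitF t).2).2
          = (pvSplitF t).1 :: (pvSplitF t).2 from rfl]
      rw [List.length_cons, List.range_succ_eq_map]
      rw [List.map_cons, List.map_cons, List.map_map, List.map_map]
      congr 1
      · simp only [Nat.zero_add, List.take_succ_cons, List.take_zero, List.drop_succ_cons,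
          List.drop_zero, PySem.Chars.join_singleton, pv_join_all]
      · have step1 : ∀ k, ((fun k =>
            (PySem.Chars.join [' ']
               (([] :: (pvSplitF t).1 :: (pvSplitF t).2).take (k+1)),
             PySem.Chars.join [' ']
               (([] :: (pvSplitF t).1 :: (pvSplitF t).2).drop (k+1)))) ∘ Nat.succ) k
            = ((fun p : List Char × List Char => (' ' :: p.1, p.2)) ∘ (fun k =>
            (PySem.Chars.join [' '] (((pvSplitF t).1 :: (pvSplitF t).2).take (k+1)),
             PySem.Chars.join [' '] (((pvSplitF t).1 :: (pvSplitF t).2).drop (k+1))))) k := by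
          intro k
          simp only [Function.comp_apply, Nat.succ_eq_add_one, List.take_succ_cons,
            List.drop_succ_cons]
          rw [pv_join_nil_cons]
          rfl
        rw [List.map_congr_left (fun k _ => step1 k)]
        show List.map ((fun p : List Char × List Char => (' ' :: p.1, p.2)) ∘ (fun k =>
            (PySem.Chars.join [' '] (((pvSplitF t).1 :: (pvSplitF t).2).take (k+1)),
             PySem.Chars.join [' '] (((pvSplitF t).1 :: (pvSplitF t).2).drop (k+1)))))
            (List.range (pvSplitF t).2.length) = _
        rw [← List.map_map, ih]
        simp only [List.map_map]
        apply List.map_congr_left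
        intro i _
        simp only [Function.comp_apply, List.take_succ_cons, List.drop_succ_cons]
    · rw [pvSplitF_char hc, pvIdx_char hc]
      rw [show ((c :: (pvSplitF t).1, (pvSplitF t).2)).1 = c :: (pvSplitF t).1 from rfl,
        show ((c :: (pvSplitF t).1, (pvSplitF t).2)).2 = (pvSplitF t).2 from rfl]
      have step1 : ∀ k, (fun k =>
          (PySem.Chars.join [' '] (((c :: (pvSplitF t).1) :: (pvSplitF t).2).take (k+1)),
           PySem.Chars.join [' '] (((c :: (pvSplitF t).1) :: (pvSplitF t).2).drop (k+1)))) k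
          = ((fun p : List Char × List Char => (c :: p.1, p.2)) ∘ (fun k =>
          (PySem.Chars.join [' '] (((pvSplitF t).1 :: (pvSplitF t).2).take (k+1)),
           PySem.Chars.join [' '] (((pvSplitF t).1 :: (pvSplitF t).2).drop (k+1))))) k := by
        intro k
        simp only [Function.comp_apply, List.take_succ_cons, List.drop_succ_cons]
        rw [pv_join_cons_char]
      rw [List.map_congr_left (fun k _ => step1 k)]
      show List.map ((fun p : List Char × List Char => (c :: p.1, p.2)) ∘ (fun k =>
          (PySem.Chars.join [' '] (((pvSplitF t).1 :: (pvSplitF t).2).take (k+1)),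
           PySem.Chars.join [' '] (((pvSplitF t).1 :: (pvSplitF t).2).drop (k+1)))))
          (List.range (pvSplitF t).2.length) = _
      rw [← List.map_map, ih]
      simp only [List.map_map]
      apply List.map_congr_left
      intro i _
      simp only [Function.comp_apply, List.take_succ_cons, List.drop_succ_cons]

lemma pv_idx_nil_iff (cs : List Char) : pvIdx cs = [] ↔ ' ' ∉ cs := by
  induction cs with
  | nil => simp [pvIdx]
  | cons c t ih =>
    by_cases hc : c = ' '
    · subst hc; rw [pvIdx_space]; simp
    · rw [pvIdx_char hc]
      simp only [List.map_eq_nil_iff, ih, List.mem_cons, not_or]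
      constructor
      · intro h; exact ⟨fun h' => hc h'.symm, h⟩
      · intro h; exact h.2

lemma pv_split2_nil_iff (cs : List Char) : (pvSplitF cs).2 = [] ↔ ' ' ∉ cs := by
  induction cs with
  | nil => simp [pvSplitF]
  | cons c t ih =>
    by_cases hc : c = ' '
    · subst hc; rw [pvSplitF_space]; simp
    · rw [pvSplitF_char hc]
      simp only [ih, List.mem_cons, not_or]
      constructor
      · intro h; exact ⟨fun h' => hc h'.symm, h⟩
      · intro h; exact h.2

lemma pv_enum (cs : List Char) : ∀ s : Int,
    ((PySem.List.enumerate cs s).filter (fun p => p.2 == ' ')).map (fun p => p.1)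
      = (pvIdx cs).map (fun i => s + Int.ofNat i) := by
  induction cs with
  | nil => intro s; simp [PySem.List.enumerate, pvIdx]
  | cons c t ih =>
    intro s
    have he : PySem.List.enumerate (c :: t) s = (s, c) :: PySem.List.enumerate t (s + 1) := by
      simp [PySem.List.enumerate]
    by_cases hc : c = ' '
    · subst hc
      rw [he, pvIdx_space, List.filter_cons, if_pos (by simp)]
      rw [List.map_cons, ih (s + 1), List.map_cons, List.map_map]
      congr 1
      · simp
      · apply List.map_congr_left
        intro i _
        simp only [Function.comp_apply, Int.ofNat_eq_natCast]
        push_cast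
        ring
    · rw [he, pvIdx_char hc, List.filter_cons, if_neg (by simp [hc])]
      rw [ih (s + 1), List.map_map]
      apply List.map_congr_left
      intro i _
      simp only [Function.comp_apply, Int.ofNat_eq_natCast]
      push_cast
      ring

lemma pv_pyRange_nat : ∀ (n : Nat) (a : Int),
    PySem.List.pyRange a (a + n) = (List.range n).map (fun k => a + Int.ofNat k) := by
  intro n
  induction n with
  | zero => intro a; simp [PySem.List.pyRange]
  | succ m ih =>
    intro a
    rw [PySem.List.pyRange_one_cons (by omega)]
    rw [show a + (↑(m+1) : Int) = (a+1) + ↑m by push_cast; ring, ih (a+1)]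
    rw [List.range_succ_eq_map]
    rw [List.map_cons, List.map_map]
    congr 1
    · simp
    · apply List.map_congr_left
      intro k _
      simp only [Function.comp_apply, Nat.succ_eq_add_one, Int.ofNat_eq_natCast]
      push_cast
      ring

-- ===== VERDICT (by name: the statement is the Claim_ definition above) =====
theorem create_manager_name_combinations___py_spec : Claim_equal_create_manager_name_combinations___py := by
  intro manager _ hpre
  unfold Spec_create_manager_name_combinations___py
  unfold create_manager_name_combinations___py create_manager_name_combinations___py_alt
  set cs := manager.toList with hcs
  -- the split parts, at String level and at List Char level
  have hsplit : (PySem.Str.split? manager " ").map (List.map String.toList)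
      = some ((pvSplitF cs).1 :: (pvSplitF cs).2) := by
    rw [PySem.Str.split?_map]
    have hsep : (" " : String).toList = [' '] := rfl
    rw [hsep]
    rw [show PySem.Chars.split? cs [' '] = some (PySem.Chars.splitOn cs [' ']) from by
      simp [PySem.Chars.split?]]
    rw [pv_splitOn_eq]
  obtain ⟨sp, hsp, hspl⟩ : ∃ sp, PySem.Str.split? manager " " = some sp ∧
      sp.map String.toList = (pvSplitF cs).1 :: (pvSplitF cs).2 := by
    cases h : PySem.Str.split? manager " " with
    | none => rw [h] at hsplit; simp at hsplit
    | some sp => rw [h] at hsplit; simp at hsplit; exact ⟨sp, rfl, hsplit⟩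
  rw [hsp]
  simp only [Option.getD_some]
  set n := (pvSplitF cs).2.length with hn
  have hlen : sp.length = n + 1 := by
    have := congrArg List.length hspl
    simpa using this
  have hne : (pvSplitF cs).2 ≠ [] := by
    rw [ne_eq, pv_split2_nil_iff]; exact fun h => h hpre
  have hn1 : 1 ≤ n := by
    cases h2 : (pvSplitF cs).2 with
    | nil => exact absurd h2 hne
    | cons q r => simp [hn, h2]
  -- B's positions
  have hpos : ((PySem.List.enumerate cs).filter (fun p => p.2 == ' ')).map (fun p => p.1)
      = (pvIdx cs).map (fun i => Int.ofNat i) := by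
    rw [show PySem.List.enumerate cs = PySem.List.enumerate cs 0 from rfl, pv_enum cs 0]
    apply List.map_congr_left; intro i _; simp
  have hidxne : pvIdx cs ≠ [] := by
    rw [ne_eq, pv_idx_nil_iff]; exact fun h => h hpre
  rw [hpos]
  have hposne : ((pvIdx cs).map (fun i => Int.ofNat i)).isEmpty = false := by
    simp [hidxne]
  rw [hposne]
  simp only [Bool.false_eq_true, if_false]
  -- the common closed form: ranges over k < n of (join take, join drop)
  have hform : ∀ (res : List (String × String)),
      res = (List.range n).map (fun k =>
        (PySem.Str.join " " (sp.take (k+1)), PySem.Str.join " " (sp.drop (k+1)))) →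
      res = ((pvIdx cs).map (fun i => Int.ofNat i)).map (fun i =>
        (PySem.Str.slice manager none (some i),
         PySem.Str.slice manager (some (i + 1)) none)) := by
    intro res hres
    rw [List.map_map]
    have hinj : Function.Injective (fun (p : String × String) => (p.1.toList, p.2.toList)) := by
      intro p q h
      simp only [Prod.mk.injEq, String.toList_inj] at h
      exact Prod.ext h.1 h.2
    apply List.map_injective_iff.mpr hinj
    rw [hres, List.map_map, List.map_map]
    have lhs_eq : ∀ k, ((fun (p : String × String) => (p.1.toList, p.2.toList)) ∘ (fun k =>
        (PySem.Str.join " " (sp.take (k+1)), PySem.Str.join " " (sp.drop (k+1))))) k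
        = (PySem.Chars.join [' '] (((pvSplitF cs).1 :: (pvSplitF cs).2).take (k+1)),
           PySem.Chars.join [' '] (((pvSplitF cs).1 :: (pvSplitF cs).2).drop (k+1))) := by
      intro k
      simp only [Function.comp_apply, PySem.Str.toList_join, ← hspl, ← List.map_take,
        ← List.map_drop]
      rfl
    rw [List.map_congr_left (fun k _ => lhs_eq k), pv_main]
    apply List.map_congr_left
    intro i _
    simp only [Function.comp_apply, Int.ofNat_eq_natCast, Prod.mk.injEq]
    constructor
    · rw [PySem.Str.toList_slice, PySem.Chars.slice_eq_listSlice,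
        PySem.List.slice_to _ (by positivity)]
      simp [hcs]
    · rw [PySem.Str.toList_slice, PySem.Chars.slice_eq_listSlice,
        show ((i : Int) + 1) = ((i + 1 : Nat) : Int) by push_cast; ring,
        PySem.List.slice_from _ (by positivity)]
      simp [hcs]
  -- now discharge A's three branches
  by_cases h1 : ((sp.length : Int) == 1) = true
  · exfalso; simp [hlen] at h1; omega
  simp only [h1, Bool.false_eq_true, if_false]
  by_cases h2 : ((sp.length : Int) == 2) = true
  · -- two tokens: the explicit pair equals the general formula at n = 1
    have hn2 : n = 1 := by simp [hlen] at h2; omega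
    simp only [h2, if_true]
    apply hform
    obtain ⟨p0, p1, hsp2⟩ : ∃ p0 p1, sp = [p0, p1] := by
      have : sp.length = 2 := by omega
      match sp, this with
      | [p0, p1], _ => exact ⟨p0, p1, rfl⟩
    subst hsp2
    rw [hn2]
    simp only [List.range_one, List.map_cons, List.map_nil]
    have hj1 : PySem.Str.join " " [p0] = p0 := by
      rw [← String.toList_inj, PySem.Str.toList_join]
      simp [PySem.Chars.join_singleton]
    have hj2 : PySem.Str.join " " [p1] = p1 := by
      rw [← String.toList_inj, PySem.Str.toList_join]
      simp [PySem.Chars.join_singleton]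
    simp [hj1, hj2]
  · -- three or more tokens: A's loop is the general formula
    simp only [h2, Bool.false_eq_true, if_false]
    apply hform
    have hcount : ((sp.length : Int)) - 1 = (0 : Int) + (n : Nat) := by rw [hlen]; push_cast; ring
    rw [hcount, pv_pyRange_nat n 0, List.map_map]
    apply List.map_congr_left
    intro k _
    simp only [Function.comp_apply, Int.ofNat_eq_natCast]
    have hsl1 : PySem.List.slice sp none (some ((0 : Int) + (k : Int) + 1)) = sp.take (k+1) := by
      rw [show ((0:Int) + (k : Int) + 1) = ((k+1 : Nat) : Int) by push_cast; ring,
        PySem.List.slice_to _ (by positivity)]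
      simp
    have hsl2 : PySem.List.slice sp (some ((0 : Int) + (k : Int) + 1)) none = sp.drop (k+1) := by
      rw [show ((0:Int) + (k : Int) + 1) = ((k+1 : Nat) : Int) by push_cast; ring,
        PySem.List.slice_from _ (by positivity)]
      simp
    rw [hsl1, hsl2]
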